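-- pv_equiv track=rewrite | github.com/toastedyeti/AdventOfCode2018 | D11/D11.py | cellValue
-- ===== SOURCE A (Python) =====
-- def cellValue(x,y,c,s):
--     r = []
--     outsum = 0
--     xr = [i for i in range(x, x+s)]
--     yr = [i for i in range(y, y+s)]
--     for x in xr:
--         for y in yr:
--             r.append((x,y))
--     for i in r:
--             if i in c:
--                 # this may produce incorrect for P1, as it was altered (incorrectly) for part2
--                 # attempting to set a boundary to skip if the grid looks outside of
--                 if i[0] + s <= 300 and i[1] + s  <= 300:
--                     outsum += int(c[i])
--                 else:
--                     pass
--     return outsum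
-- ===== SOURCE B (Python) =====
-- def cellValue(x, y, c, s):
--     # Single pass over the dictionary's entries instead of scanning the s*s grid:
--     # an entry contributes iff its key lies in the block and passes the boundary filter.
--     total = 0
--     for (kx, ky), v in c.items():
--         if x <= kx < x + s and y <= ky < y + s and kx + s <= 300 and ky + s <= 300:
--             total += int(v)
--     return total
-- ===== Notes on version B (the rewrite author's own statement) =====
-- stated objective: faster
-- what changed: Instead of enumerating the s*s grid cells and probing the dict for each, B makes one pass over the dict's entries and adds a value exactly when its key lies inside the (boundary-filtered) block; intended as asymptotically faster (O(|c|) vs O(s^2)), measured e.g. A 218.9 ms vs B 0.2 ms at n=4096 (at the largest sizes A sometimes times out, so the top-size measurement may be unconfirmed).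
import Mathlib
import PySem

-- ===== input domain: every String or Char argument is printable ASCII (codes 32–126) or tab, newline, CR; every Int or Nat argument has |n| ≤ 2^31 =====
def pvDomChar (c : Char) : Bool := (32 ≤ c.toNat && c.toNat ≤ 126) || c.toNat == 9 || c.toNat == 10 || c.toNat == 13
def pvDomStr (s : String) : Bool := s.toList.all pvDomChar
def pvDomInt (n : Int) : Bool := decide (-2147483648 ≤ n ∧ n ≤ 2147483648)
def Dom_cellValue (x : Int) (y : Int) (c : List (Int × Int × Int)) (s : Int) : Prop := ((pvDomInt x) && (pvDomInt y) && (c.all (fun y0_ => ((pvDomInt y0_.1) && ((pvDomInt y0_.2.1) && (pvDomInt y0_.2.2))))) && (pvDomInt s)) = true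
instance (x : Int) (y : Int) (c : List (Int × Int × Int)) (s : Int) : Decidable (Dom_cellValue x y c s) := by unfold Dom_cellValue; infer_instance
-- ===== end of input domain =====

-- B replaces A's scan over the s×s grid cells (a dict probe per cell) by ONE pass over the
-- dict's entries, adding a value exactly when its key lies in the boundary-filtered block.

-- ===== PORT A =====
-- `i in c` on the dict: key membership (keys are the first two components)
def memKeyA (c : List (Int × Int × Int)) (k : Int × Int) : Bool :=
  c.any (fun p => p.1 == k.1 && p.2.1 == k.2)

-- `c[i]`: value of the first matching key; only called under the membership guard,
-- so the [] default is unreachable in A (exact there)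
def getItemA (c : List (Int × Int × Int)) (k : Int × Int) : Int :=
  match c with
  | [] => 0
  | p :: t => if p.1 == k.1 && p.2.1 == k.2 then p.2.2 else getItemA t k

def cellValue (x : Int) (y : Int) (c : List (Int × Int × Int)) (s : Int) : Int :=
  let xr := PySem.List.pyRange x (x + s) 1
  let yr := PySem.List.pyRange y (y + s) 1
  let r := xr.foldl (fun acc cx => yr.foldl (fun acc2 cy => acc2 ++ [(cx, cy)]) acc)
            ([] : List (Int × Int))
  r.foldl (fun outsum i =>
    if memKeyA c i then
      if i.1 + s ≤ 300 ∧ i.2 + s ≤ 300 then outsum + getItemA c i else outsum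
    else outsum) 0

-- ===== PORT B =====
-- one pass over c.items(): add v when the key is inside the block and passes the filter
def cellValue_alt (x : Int) (y : Int) (c : List (Int × Int × Int)) (s : Int) : Int :=
  c.foldl (fun total p =>
    if x ≤ p.1 ∧ p.1 < x + s ∧ y ≤ p.2.1 ∧ p.2.1 < y + s ∧ p.1 + s ≤ 300 ∧ p.2.1 + s ≤ 300
    then total + p.2.2 else total) 0

-- ===== PRECONDITION & SPEC =====
-- Pre_ excludes association lists with duplicate keys: these do not arise from a Python dict
-- (Python's dict collapses them before either function runs), and on such raw lists A's
-- first-match lookup and B's full-entry scan are both defensible readings.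
def Pre_cellValue (x : Int) (y : Int) (c : List (Int × Int × Int)) (s : Int) : Prop :=
  c.Pairwise (fun p q => ¬(p.1 = q.1 ∧ p.2.1 = q.2.1))
instance (x : Int) (y : Int) (c : List (Int × Int × Int)) (s : Int) : Decidable (Pre_cellValue x y c s) := by unfold Pre_cellValue; infer_instance

def pvWitness_cellValue : Int × Int × (List (Int × Int × Int)) × Int :=
  (1, 1, [(1, 1, 7), (2, 1, 3)], 2)

def Spec_cellValue (x : Int) (y : Int) (c : List (Int × Int × Int)) (s : Int) (out : Int) : Prop := out = cellValue_alt x y c s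
instance (x : Int) (y : Int) (c : List (Int × Int × Int)) (s : Int) (out : Int) : Decidable (Spec_cellValue x y c s out) := by unfold Spec_cellValue; infer_instance

-- ===== CLAIM =====
def Claim_equal_cellValue : Prop := ∀ (x : Int) (y : Int) (c : List (Int × Int × Int)) (s : Int), Dom_cellValue x y c s → Pre_cellValue x y c s → Spec_cellValue x y c s (cellValue x y c s)

-- ===== LEMMAS AND PROOFS =====

theorem buildInner (cx : Int) (ys : List Int) (acc : List (Int × Int)) :
    ys.foldl (fun a2 cy => a2 ++ [(cx, cy)]) acc = acc ++ ys.map (fun cy => (cx, cy)) := by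
  induction ys generalizing acc with
  | nil => simp
  | cons cy t ih => rw [List.foldl_cons, ih]; simp

theorem buildOuter (ys : List Int) (xs : List Int) (acc : List (Int × Int)) :
    xs.foldl (fun acc cx => ys.foldl (fun a2 cy => a2 ++ [(cx, cy)]) acc) acc
      = acc ++ xs.flatMap (fun cx => ys.map (fun cy => (cx, cy))) := by
  induction xs generalizing acc with
  | nil => simp
  | cons cx t ih => rw [List.foldl_cons, buildInner, ih]; simp

-- `getDB c g` = first matching value, 0 if absent (prop-equality form of getItemA)
def getDB (c : List (Int × Int × Int)) (g : Int × Int) : Int :=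
  match c with
  | [] => 0
  | p :: t => if (p.1, p.2.1) = g then p.2.2 else getDB t g

theorem getItemA_eq_getDB (c : List (Int × Int × Int)) (k : Int × Int) :
    getItemA c k = getDB c k := by
  induction c with
  | nil => rfl
  | cons p t ih =>
    simp only [getItemA, getDB, ih, Prod.ext_iff]
    by_cases h1 : p.1 = k.1 <;> by_cases h2 : p.2.1 = k.2 <;> simp [h1, h2]

theorem getDB_of_not_mem (c : List (Int × Int × Int)) (k : Int × Int)
    (h : memKeyA c k = false) : getDB c k = 0 := by
  induction c with
  | nil => rfl
  | cons p t ih =>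
    rw [memKeyA, List.any_cons, Bool.or_eq_false_iff] at h
    have h1 : ¬((p.1, p.2.1) = k) := by
      intro he
      have := h.1
      simp [← he] at this
    simp only [getDB, if_neg h1]
    exact ih h.2

theorem foldlA_sum (c : List (Int × Int × Int)) (s : Int) (l : List (Int × Int)) (a : Int) :
    l.foldl (fun outsum i =>
      if memKeyA c i then
        if i.1 + s ≤ 300 ∧ i.2 + s ≤ 300 then outsum + getItemA c i else outsum
      else outsum) a
    = a + (l.map (fun i =>
        if i.1 + s ≤ 300 ∧ i.2 + s ≤ 300 then getDB c i else 0)).sum := by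
  induction l generalizing a with
  | nil => simp
  | cons i t ih =>
    rw [List.foldl_cons, ih]
    have hstep : (if memKeyA c i then
        if i.1 + s ≤ 300 ∧ i.2 + s ≤ 300 then a + getItemA c i else a
      else a)
      = a + (if i.1 + s ≤ 300 ∧ i.2 + s ≤ 300 then getDB c i else 0) := by
      cases hm : memKeyA c i with
      | false => simp [getDB_of_not_mem c i hm]
      | true => by_cases hc : i.1 + s ≤ 300 ∧ i.2 + s ≤ 300 <;>
          simp [hc, getItemA_eq_getDB]
    rw [hstep]
    simp [add_assoc]

theorem sum_map_zero_int {α : Type} (l : List α) : (l.map (fun _ => (0 : Int))).sum = 0 := by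
  induction l with
  | nil => rfl
  | cons x t ih => simp only [List.map_cons, List.sum_cons, zero_add]; exact ih

-- summing an "update at k" over a duplicate-free list
theorem map_ite_sum (L : List (Int × Int)) (k : Int × Int) (v : Int) (f : Int × Int → Int)
    (h : L.Nodup) :
    (L.map (fun g => if k = g then v else f g)).sum
      = (L.map f).sum + (if k ∈ L then v - f k else 0) := by
  induction L with
  | nil => simp
  | cons a t ih =>
    rw [List.nodup_cons] at h
    by_cases hk : k = a
    · subst hk
      have hnt : k ∉ t := h.1
      have : (t.map (fun g => if k = g then v else f g)).sum = (t.map f).sum := by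
        congr 1
        apply List.map_congr_left
        intro g hg
        have : k ≠ g := fun he => hnt (he ▸ hg)
        simp [this]
      simp only [List.map_cons, List.sum_cons, if_pos rfl, this, List.mem_cons, true_or,
        if_true, if_neg hnt]
      ring
    · have hmemiff : (k = a ∨ k ∈ t) ↔ k ∈ t := by simp [hk]
      simp only [List.map_cons, List.sum_cons, if_neg hk, ih h.2, List.mem_cons, hmemiff]
      ring

theorem foldl_shift (step : Int × Int × Int → Int) (c : List (Int × Int × Int))
    (P : Int × Int × Int → Prop) [DecidablePred P] (a : Int) :
    c.foldl (fun t p => if P p then t + step p else t) a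
      = a + c.foldl (fun t p => if P p then t + step p else t) 0 := by
  induction c generalizing a with
  | nil => simp
  | cons p t ih =>
    rw [List.foldl_cons, List.foldl_cons, ih, ih (if P p then 0 + step p else 0)]
    by_cases h : P p <;> simp [h] <;> ring

-- main bridge: grid-side sum of lookups = entry-side filtered sum, given distinct keys
theorem sum_getD_eq_fold (c : List (Int × Int × Int)) (L : List (Int × Int))
    (hnd : L.Nodup) (hkeys : c.Pairwise (fun p q => ¬(p.1 = q.1 ∧ p.2.1 = q.2.1))) :
    (L.map (fun g => getDB c g)).sum
      = c.foldl (fun t p => if (p.1, p.2.1) ∈ L then t + p.2.2 else t) 0 := by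
  induction c with
  | nil => simp [getDB, sum_map_zero_int]
  | cons p t ih =>
    rw [List.pairwise_cons] at hkeys
    have hgd : ∀ g, getDB (p :: t) g = if (p.1, p.2.1) = g then p.2.2 else getDB t g := by
      intro g; rfl
    have h1 : (L.map (fun g => getDB (p :: t) g)).sum
        = (L.map (fun g => getDB t g)).sum
          + (if (p.1, p.2.1) ∈ L then p.2.2 - getDB t (p.1, p.2.1) else 0) := by
      simp only [hgd]
      exact map_ite_sum L (p.1, p.2.1) p.2.2 (fun g => getDB t g) hnd
    have h0 : getDB t (p.1, p.2.1) = 0 := by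
      apply getDB_of_not_mem
      rw [memKeyA, List.any_eq_false]
      intro q hq
      have := hkeys.1 q hq
      simp only [Bool.and_eq_true, beq_iff_eq, not_and]
      intro he1
      intro he2
      exact this ⟨he1.symm, he2.symm⟩
    rw [h1, h0, ih hkeys.2, List.foldl_cons]
    by_cases hm : (p.1, p.2.1) ∈ L
    · simp only [hm, if_pos, if_true]
      rw [foldl_shift (fun p => p.2.2) t (fun q => (q.1, q.2.1) ∈ L) (0 + p.2.2)]
      ring
    · simp [hm]

-- congruence of B's fold with a pointwise-equivalent condition
theorem foldl_cond_congr (c : List (Int × Int × Int))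
    (P Q : Int × Int × Int → Prop) [DecidablePred P] [DecidablePred Q]
    (h : ∀ p, P p ↔ Q p) (a : Int) :
    c.foldl (fun t p => if P p then t + p.2.2 else t) a
      = c.foldl (fun t p => if Q p then t + p.2.2 else t) a := by
  induction c generalizing a with
  | nil => rfl
  | cons p t ih =>
    rw [List.foldl_cons, List.foldl_cons]
    by_cases hp : P p
    · rw [if_pos hp, if_pos ((h p).mp hp)]; exact ih _
    · rw [if_neg hp, if_neg (fun hq => hp ((h p).mpr hq))]; exact ih _

theorem nodup_grid (R1 R2 : List Int) (h1 : R1.Nodup) (h2 : R2.Nodup) :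
    (R1.flatMap (fun cx => R2.map (fun cy => (cx, cy)))).Nodup := by
  induction R1 with
  | nil => simp
  | cons cx t ih =>
    rw [List.nodup_cons] at h1
    rw [List.flatMap_cons]
    apply List.Nodup.append
    · exact h2.map (fun a b hab => by simpa using congrArg Prod.snd hab)
    · exact ih h1.2
    · intro g hg hgt
      obtain ⟨cy, hcy, rfl⟩ := List.mem_map.mp hg
      rw [List.mem_flatMap] at hgt
      obtain ⟨cx', hcx', hmem⟩ := hgt
      obtain ⟨cy', hcy', heq⟩ := List.mem_map.mp hmem
      have hcc : cx' = cx := (Prod.ext_iff.mp heq).1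
      exact h1.1 (hcc ▸ hcx')

theorem mem_grid (R1 R2 : List Int) (g : Int × Int) :
    g ∈ R1.flatMap (fun cx => R2.map (fun cy => (cx, cy))) ↔ g.1 ∈ R1 ∧ g.2 ∈ R2 := by
  simp only [List.mem_flatMap, List.mem_map]
  constructor
  · rintro ⟨cx, hcx, cy, hcy, rfl⟩; exact ⟨hcx, hcy⟩
  · rintro ⟨h1, h2⟩; exact ⟨g.1, h1, g.2, h2, rfl⟩

theorem sum_clip (F : Int → Int) (m b : Int) :
    ∀ (n : ℕ) (a : Int), (b - a).toNat = n →
      ((PySem.List.pyRange a b 1).map (fun t => if t < m then F t else 0)).sum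
        = ((PySem.List.pyRange a (min b m) 1).map F).sum := by
  intro n
  induction n with
  | zero =>
    intro a h
    have hba : b ≤ a := by omega
    rw [PySem.List.pyRange_one_eq_nil hba, PySem.List.pyRange_one_eq_nil (by omega)]
    rfl
  | succ n ih =>
    intro a h
    have hab : a < b := by omega
    rw [PySem.List.pyRange_one_cons hab]
    by_cases hm : a < m
    · rw [PySem.List.pyRange_one_cons (by omega : a < min b m)]
      simp only [List.map_cons, List.sum_cons, if_pos hm]
      rw [ih (a + 1) (by omega)]
    · rw [PySem.List.pyRange_one_eq_nil (by omega : min b m ≤ a)]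
      simp only [List.map_cons, List.sum_cons, if_neg hm]
      rw [ih (a + 1) (by omega), PySem.List.pyRange_one_eq_nil (by omega : min b m ≤ a + 1)]
      simp

theorem sum_flatMap_int {α : Type} (g : α → List Int) (l : List α) :
    (l.flatMap g).sum = (l.map (fun a => (g a).sum)).sum := by
  induction l with
  | nil => rfl
  | cons a t ih => simp [List.flatMap_cons, ih]

-- A's value = sum of getDB over the CLIPPED grid list
theorem cellValue_eq_gridSum (x y : Int) (c : List (Int × Int × Int)) (s : Int) :
    cellValue x y c s
      = (((PySem.List.pyRange x (min (x + s) (301 - s)) 1).flatMap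
          (fun cx => (PySem.List.pyRange y (min (y + s) (301 - s)) 1).map
            (fun cy => (cx, cy)))).map (fun g => getDB c g)).sum := by
  unfold cellValue
  simp only []
  rw [buildOuter, List.nil_append, foldlA_sum, zero_add, List.map_flatMap]
  have hsplit : ∀ cx : Int,
      ((PySem.List.pyRange y (y + s) 1).map (fun cy =>
        if cx + s ≤ 300 ∧ cy + s ≤ 300 then getDB c (cx, cy) else 0)).sum
      = if cx < 301 - s then
          ((PySem.List.pyRange y (min (y + s) (301 - s)) 1).map (fun cy => getDB c (cx, cy))).sum
        else 0 := by
    intro cx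
    by_cases hx : cx < 301 - s
    · rw [if_pos hx, ← sum_clip (fun cy => getDB c (cx, cy)) (301 - s) (y + s) _ y rfl]
      congr 1
      apply List.map_congr_left
      intro cy _
      have : (cx + s ≤ 300 ∧ cy + s ≤ 300) ↔ cy < 301 - s := by omega
      simp only [this]
    · rw [if_neg hx]
      have : ∀ cy : Int, (if cx + s ≤ 300 ∧ cy + s ≤ 300 then getDB c (cx, cy) else 0) = 0 := by
        intro cy; rw [if_neg (by omega)]
      calc ((PySem.List.pyRange y (y + s) 1).map (fun cy =>
              if cx + s ≤ 300 ∧ cy + s ≤ 300 then getDB c (cx, cy) else 0)).sum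
          = ((PySem.List.pyRange y (y + s) 1).map (fun _ => (0 : Int))).sum := by
            congr 1; apply List.map_congr_left; intro cy _; exact this cy
        _ = 0 := sum_map_zero_int _
  rw [List.map_flatMap, sum_flatMap_int, sum_flatMap_int]
  calc ((PySem.List.pyRange x (x + s) 1).map (fun cx =>
          (((PySem.List.pyRange y (y + s) 1).map (fun cy => (cx, cy))).map (fun i =>
            if i.1 + s ≤ 300 ∧ i.2 + s ≤ 300 then getDB c i else 0)).sum)).sum
      = ((PySem.List.pyRange x (x + s) 1).map (fun cx =>
          if cx < 301 - s then
            ((PySem.List.pyRange y (min (y + s) (301 - s)) 1).map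
              (fun cy => getDB c (cx, cy))).sum
          else 0)).sum := by
        congr 1
        apply List.map_congr_left
        intro cx _
        rw [List.map_map]
        exact hsplit cx
    _ = _ := by
        rw [sum_clip _ (301 - s) (x + s) _ x rfl]
        congr 1
        apply List.map_congr_left
        intro cx _
        rw [List.map_map]
        rfl

-- ===== VERDICT =====
theorem cellValue_spec : Claim_equal_cellValue := by
  intro x y c s _ hpre
  show cellValue x y c s = cellValue_alt x y c s
  rw [cellValue_eq_gridSum]
  set R1 := PySem.List.pyRange x (min (x + s) (301 - s)) 1 with hR1
  set R2 := PySem.List.pyRange y (min (y + s) (301 - s)) 1 with hR2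
  set L := R1.flatMap (fun cx => R2.map (fun cy => (cx, cy))) with hL
  rw [sum_getD_eq_fold c L
    (nodup_grid R1 R2 (PySem.List.nodup_pyRange_one _ _) (PySem.List.nodup_pyRange_one _ _)) hpre]
  unfold cellValue_alt
  apply foldl_cond_congr
  intro p
  rw [hL, mem_grid, hR1, hR2, PySem.List.mem_pyRange_one, PySem.List.mem_pyRange_one]
  omega
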